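-- pv_equiv track=rewrite | github.com/popposs/stat428_final | part1/main.py | mark_boundaries
-- ===== SOURCE A (Python) =====
-- from collections import defaultdict
--
-- def mark_boundaries(lng, lat):
-- 	m = defaultdict(list)
-- 	for (a, b) in list(zip(lng, lat)):
-- 		m[a].append(b)
-- 		m[b].append(a)
--
-- 	for key, value in m.items():
-- 		m[key] = [min(value), max(value)]
-- 	return m
-- ===== SOURCE B (Python) =====
-- from collections import defaultdict
--
-- def mark_boundaries(lng, lat):
--     # one pass: maintain a running [min, max] per key instead of
--     # collecting full neighbor lists and reducing afterwards
--     m = defaultdict(list)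
--     for a, b in zip(lng, lat):
--         for k, x in ((a, b), (b, a)):
--             v = m.get(k)
--             if v is None:
--                 m[k] = [x, x]
--             else:
--                 lo, hi = v
--                 m[k] = [min(lo, x), max(hi, x)]
--     return m
-- ===== Notes on version B (the rewrite author's own statement) =====
-- stated objective: simpler
-- what changed: B keeps a running [min, max] per key in a single pass over zip(lng, lat) instead of accumulating full neighbor lists and then reducing each list with min/max in a second loop; memory per key drops from O(degree) to O(1).
import Mathlib
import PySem

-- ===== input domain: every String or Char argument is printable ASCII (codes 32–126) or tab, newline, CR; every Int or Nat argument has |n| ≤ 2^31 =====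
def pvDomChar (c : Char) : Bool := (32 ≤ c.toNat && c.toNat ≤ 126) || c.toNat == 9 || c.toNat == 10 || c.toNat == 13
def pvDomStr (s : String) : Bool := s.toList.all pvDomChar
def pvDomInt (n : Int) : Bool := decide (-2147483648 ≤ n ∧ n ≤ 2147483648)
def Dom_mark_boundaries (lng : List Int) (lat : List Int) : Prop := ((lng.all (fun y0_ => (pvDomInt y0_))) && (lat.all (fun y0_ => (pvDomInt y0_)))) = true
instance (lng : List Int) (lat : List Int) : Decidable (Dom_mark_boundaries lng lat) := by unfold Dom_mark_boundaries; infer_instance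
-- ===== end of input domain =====

-- B replaces A's neighbor-list accumulation plus second reduction loop by a single
-- pass that keeps a running [min, max] per key (objective: simpler, one loop).

-- ===== PORT A =====
-- [min(value), max(value)] of A's second loop; value is never [] there
def pvMinMax (v : List Int) : List Int :=
  match PySem.List.min? v (fun y => y), PySem.List.max? v (fun y => y) with
  | some mn, some mx => [mn, mx]
  | _, _ => []

def mark_boundaries (lng : List Int) (lat : List Int) : List (Int × List Int) :=
  let m : PySem.Dict Int (List Int) :=
    (List.zip lng lat).foldl
      (fun d p =>
        let d1 := d.insert p.1 (d.getD p.1 [] ++ [p.2])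
        d1.insert p.2 (d1.getD p.2 [] ++ [p.1]))
      PySem.Dict.empty
  let m2 := m.items.foldl (fun d kv => d.insert kv.1 (pvMinMax kv.2)) m
  m2.items

-- ===== PORT B =====
-- one (k, x) update of B's inner loop
def pvUpd (d : PySem.Dict Int (List Int)) (k x : Int) : PySem.Dict Int (List Int) :=
  match d.get? k with
  | none => d.insert k [x, x]
  | some v =>
    match v with
    | [lo, hi] => d.insert k [min lo x, max hi x]
    | _ => d  -- unreachable: every stored value is a two-element list

def mark_boundaries_alt (lng : List Int) (lat : List Int) : List (Int × List Int) :=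
  ((List.zip lng lat).foldl
      (fun d p => pvUpd (pvUpd d p.1 p.2) p.2 p.1)
      PySem.Dict.empty).items

-- ===== PRECONDITION & SPEC =====
def Spec_mark_boundaries (lng : List Int) (lat : List Int) (out : List (Int × List Int)) : Prop := out = mark_boundaries_alt lng lat
instance (lng : List Int) (lat : List Int) (out : List (Int × List Int)) : Decidable (Spec_mark_boundaries lng lat out) := by unfold Spec_mark_boundaries; infer_instance

-- ===== CLAIM (what is proved, stated in full; the proofs are below) =====
def Claim_equal_mark_boundaries : Prop := ∀ (lng : List Int) (lat : List Int), Dom_mark_boundaries lng lat → Spec_mark_boundaries lng lat (mark_boundaries lng lat)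

-- ===== LEMMAS AND PROOFS =====

-- map pvMinMax over the values of a dict
def pvMV (d : PySem.Dict Int (List Int)) : PySem.Dict Int (List Int) :=
  PySem.Dict.mk (d.items.map (fun p => (p.1, pvMinMax p.2)))

theorem pvMV_get? (d : PySem.Dict Int (List Int)) (k : Int) :
    (pvMV d).get? k = (d.get? k).map pvMinMax := by
  simp only [pvMV, PySem.Dict.get?, List.find?_map]
  rw [show ((fun p : Int × List Int => p.1 == k) ∘ fun p : Int × List Int => (p.1, pvMinMax p.2))
        = (fun p : Int × List Int => p.1 == k) from rfl]
  cases h : List.find? (fun p : Int × List Int => p.1 == k) d.items <;> simp_all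

theorem pvMV_insert (d : PySem.Dict Int (List Int)) (k : Int) (v : List Int) :
    pvMV (d.insert k v) = (pvMV d).insert k (pvMinMax v) := by
  have hc : (PySem.Dict.mk (d.items.map (fun p => (p.1, pvMinMax p.2)))).contains k
      = d.contains k := by
    simp only [PySem.Dict.contains, List.any_map]
    rfl
  apply PySem.Dict.ext
  simp only [pvMV]
  by_cases h : d.contains k = true
  · rw [PySem.Dict.items_insert_of_contains _ _ h,
        PySem.Dict.items_insert_of_contains _ _ (hc.trans h)]
    simp only [List.map_map]
    apply List.map_congr_left
    intro p _
    by_cases hp : (p.1 == k) = true <;> simp [Function.comp, hp]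
  · have h' : d.contains k = false := by simp [h]
    rw [PySem.Dict.items_insert_of_not_contains _ _ h',
        PySem.Dict.items_insert_of_not_contains _ _ (hc.trans h')]
    simp

theorem pvMinMax_cons (y : Int) (t : List Int) :
    pvMinMax (y :: t) = [t.foldl min y, t.foldl max y] := by
  simp [pvMinMax, PySem.List.min?_id_cons, PySem.List.max?_id_cons]

theorem pvMinMax_append (y : Int) (t : List Int) (x : Int) :
    pvMinMax ((y :: t) ++ [x])
      = [min (t.foldl min y) x, max (t.foldl max y) x] := by
  have h : (y :: t) ++ [x] = y :: (t ++ [x]) := by simp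
  rw [h, pvMinMax_cons, List.foldl_append, List.foldl_append]
  simp

-- one key update: B's running min/max step on the reduced dict
-- equals reducing A's append step (stored values are nonempty)
theorem pvUpd_step (d : PySem.Dict Int (List Int)) (k x : Int)
    (hk : ∀ v, d.get? k = some v → v ≠ []) :
    pvUpd (pvMV d) k x = pvMV (d.insert k (d.getD k [] ++ [x])) := by
  unfold pvUpd
  rw [pvMV_get?]
  cases h : d.get? k with
  | none =>
    rw [PySem.Dict.getD_of_get?_eq_none _ _ h]
    simp only [Option.map_none]
    rw [pvMV_insert]
    have : pvMinMax ([] ++ [x]) = [x, x] := by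
      simp [pvMinMax, PySem.List.min?_id_cons, PySem.List.max?_id_cons]
    rw [this]
  | some v =>
    rw [PySem.Dict.getD_of_get?_eq_some _ _ h]
    obtain ⟨y, t, rfl⟩ : ∃ y t, v = y :: t := by
      cases v with
      | nil => exact absurd rfl (hk [] h)
      | cons y t => exact ⟨y, t, rfl⟩
    simp only [Option.map_some, pvMinMax_cons]
    rw [pvMV_insert, pvMinMax_append]

-- A's first-loop step
def pvStepA (d : PySem.Dict Int (List Int)) (p : Int × Int) : PySem.Dict Int (List Int) :=
  let d1 := d.insert p.1 (d.getD p.1 [] ++ [p.2])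
  d1.insert p.2 (d1.getD p.2 [] ++ [p.1])

theorem pvStepA_ne (d : PySem.Dict Int (List Int)) (p : Int × Int)
    (hd : ∀ k v, d.get? k = some v → v ≠ []) :
    ∀ k v, (pvStepA d p).get? k = some v → v ≠ [] := by
  intro k v h
  unfold pvStepA at h
  simp only [PySem.Dict.get?_insert] at h
  split_ifs at h with h1 h2
  · cases h; simp
  · cases h; simp
  · exact hd k v h

-- main invariant over the first loop
theorem pv_main (l : List (Int × Int)) (d : PySem.Dict Int (List Int))
    (hd : ∀ k v, d.get? k = some v → v ≠ []) :
    l.foldl (fun d p => pvUpd (pvUpd d p.1 p.2) p.2 p.1) (pvMV d)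
      = pvMV (l.foldl pvStepA d) := by
  induction l generalizing d with
  | nil => rfl
  | cons p t ih =>
    simp only [List.foldl_cons]
    have h1 : ∀ v, d.get? p.1 = some v → v ≠ [] := fun v h => hd p.1 v h
    have e1 := pvUpd_step d p.1 p.2 h1
    have h2 : ∀ v, (d.insert p.1 (d.getD p.1 [] ++ [p.2])).get? p.2 = some v → v ≠ [] := by
      intro v h
      rw [PySem.Dict.get?_insert] at h
      split_ifs at h with hc
      · cases h; simp
      · exact hd p.2 v h
    have e2 := pvUpd_step (d.insert p.1 (d.getD p.1 [] ++ [p.2])) p.2 p.1 h2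
    show List.foldl _ (pvUpd (pvUpd (pvMV d) p.1 p.2) p.2 p.1) t = pvMV (List.foldl pvStepA (pvStepA d p) t)
    rw [e1, e2]
    exact ih _ (pvStepA_ne d p hd)

-- A's second loop rewrites each entry in place to pvMinMax of its own value
theorem pv_second_loop (l done : List (Int × List Int))
    (h : ((done ++ l).map (·.1)).Nodup) :
    l.foldl (fun d kv => d.insert kv.1 (pvMinMax kv.2)) (PySem.Dict.mk (done ++ l))
      = PySem.Dict.mk (done ++ l.map (fun p => (p.1, pvMinMax p.2))) := by
  induction l generalizing done with
  | nil => simp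
  | cons p t ih =>
    simp only [List.foldl_cons]
    have hcon : (PySem.Dict.mk (done ++ p :: t)).contains p.1 = true := by
      simp [PySem.Dict.contains]
    rw [show (PySem.Dict.mk (done ++ p :: t)).insert p.1 (pvMinMax p.2)
          = PySem.Dict.mk ((done ++ [(p.1, pvMinMax p.2)]) ++ t) from ?_]
    · have h' : (((done ++ [(p.1, pvMinMax p.2)]) ++ t).map (·.1)).Nodup := by
        have he : ((done ++ [(p.1, pvMinMax p.2)]) ++ t).map (·.1)
            = (done ++ p :: t).map (·.1) := by simp
        rw [he]; exact h
      rw [ih (done ++ [(p.1, pvMinMax p.2)]) h']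
      simp
    · apply PySem.Dict.ext
      rw [PySem.Dict.items_insert_of_contains _ _ hcon]
      have hdone : ∀ q ∈ done, q.1 ≠ p.1 := by
        intro q hq hqp
        have hmem : p.1 ∈ done.map (·.1) := hqp ▸ List.mem_map_of_mem hq
        have hnd := h
        simp only [List.map_append, List.map_cons, List.nodup_append] at hnd
        exact hnd.2.2 _ hmem p.1 (by simp) rfl
      have ht : ∀ q ∈ t, q.1 ≠ p.1 := by
        intro q hq hqp
        have hnd := h
        simp only [List.map_append, List.map_cons, List.nodup_append,
          List.nodup_cons] at hnd
        exact hnd.2.1.1 (hqp ▸ List.mem_map_of_mem hq)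
      show List.map _ (done ++ p :: t) = (done ++ [(p.1, pvMinMax p.2)]) ++ t
      rw [List.append_assoc, List.singleton_append, List.map_append, List.map_cons]
      congr 1
      · have := List.map_congr_left
          (f := fun q : Int × List Int =>
            if (q.1 == p.1) = true then (p.1, pvMinMax p.2) else q)
          (g := id) (l := done) (fun q hq => by simp [hdone q hq])
        simpa using this
      · congr 1
        · simp
        · have := List.map_congr_left
            (f := fun q : Int × List Int =>
              if (q.1 == p.1) = true then (p.1, pvMinMax p.2) else q)
            (g := id) (l := t) (fun q hq => by simp [ht q hq])
          simpa using this

theorem pv_nodup_first (l : List (Int × Int)) (d : PySem.Dict Int (List Int))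
    (h : d.keys.Nodup) :
    (l.foldl pvStepA d).keys.Nodup := by
  induction l generalizing d with
  | nil => exact h
  | cons p t ih =>
    exact ih _ (PySem.Dict.nodup_keys_insert _ _ _ (PySem.Dict.nodup_keys_insert _ _ _ h))

-- ===== VERDICT (by name: the statement is the Claim_ definition above) =====
theorem mark_boundaries_spec : Claim_equal_mark_boundaries := by
  intro lng lat _
  unfold Spec_mark_boundaries mark_boundaries mark_boundaries_alt
  set l := List.zip lng lat with hl
  have hemp : ∀ k v, (PySem.Dict.empty : PySem.Dict Int (List Int)).get? k = some v → v ≠ [] := by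
    intro k v h
    simp [PySem.Dict.get?, PySem.Dict.empty] at h
  have hB : (l.foldl (fun d p => pvUpd (pvUpd d p.1 p.2) p.2 p.1) PySem.Dict.empty)
      = pvMV (l.foldl pvStepA PySem.Dict.empty) := by
    have : (PySem.Dict.empty : PySem.Dict Int (List Int)) = pvMV PySem.Dict.empty := by
      apply PySem.Dict.ext; simp [pvMV, PySem.Dict.empty]
    conv_lhs => rw [this]
    exact pv_main l PySem.Dict.empty hemp
  set m := l.foldl pvStepA PySem.Dict.empty with hm
  have hnd : m.keys.Nodup := by
    apply pv_nodup_first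
    simp [PySem.Dict.keys, PySem.Dict.empty]
  have hmk : PySem.Dict.mk ([] ++ m.items) = m := PySem.Dict.ext (by simp)
  have h2 : m.items.foldl (fun d kv => d.insert kv.1 (pvMinMax kv.2)) m
      = PySem.Dict.mk (m.items.map (fun p => (p.1, pvMinMax p.2))) := by
    have := pv_second_loop m.items [] (by simpa [PySem.Dict.keys] using hnd)
    rw [hmk] at this
    simpa using this
  show (m.items.foldl (fun d kv => d.insert kv.1 (pvMinMax kv.2)) m).items
      = (l.foldl (fun d p => pvUpd (pvUpd d p.1 p.2) p.2 p.1) PySem.Dict.empty).items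
  rw [h2, hB]
  rfl
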